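-- pv_equiv track=rewrite | github.com/rfshawness/sequence-alignment-problem | miniBlast/miniBlast.py | generate_high_scoreing_neighbors
-- ===== SOURCE A (Python) =====
-- def generate_high_scoreing_neighbors(words, scoring_matrix):
--
--     word_len = len(words[0][0]) # words are tuples of (word, index)
--
--     # Common values to use with BLOSUM62 matrix:
--         # K-mer length = 2, threshold = 8
--         # K-mer length = 3, threshold = 11
--         # K-mer length = 4, threshold = 15
--     if word_len == 2:
--         threshold = 8
--     elif word_len == 3:
--         threshold = 11
--     elif word_len == 4:
--         threshold = 15
--     else:
--         threshold = 0
--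
--     # generate all 20^len(word) possible neighboring words
--     # TODO: remove duplicates from the list and only consider unique words
--     neighboring_words = set()
--     for word, index in words:  # unpack word and index from each tuple
--         for i in range(word_len):
--             for j in scoring_matrix.keys():
--                 new_word = word[:i] + j + word[i+1:]
--                 score = 0
--                 for k in range(word_len):
--                     score += scoring_matrix[word[k]][new_word[k]]
--                 if score >= threshold:
--                     neighboring_words.add((new_word, index))
--
--     return list(neighboring_words)
-- ===== SOURCE B (Python) =====
-- def generate_high_scoreing_neighbors(words, scoring_matrix):
--
--     word_len = len(words[0][0])  # words are tuples of (word, index)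
--
--     threshold = {2: 8, 3: 11, 4: 15}.get(word_len, 0)
--
--     if not scoring_matrix:
--         return []  # no substitution letters: no candidate neighbors at all
--
--     keys = list(scoring_matrix.keys())
--     neighboring_words = set()
--     for word, index in words:
--         # score of the word against itself, computed once per word
--         base = 0
--         for k in range(word_len):
--             base += scoring_matrix[word[k]][word[k]]
--         for i in range(word_len):
--             row_i = scoring_matrix[word[i]]
--             self_i = row_i[word[i]]
--             prefix = word[:i]
--             suffix = word[i + 1:]
--             for j in keys:
--                 # substituting j at position i changes only term i of the sum
--                 if base - self_i + row_i[j] >= threshold: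
--                     neighboring_words.add((prefix + j + suffix, index))
--
--     return list(neighboring_words)
-- ===== Notes on version B (the rewrite author's own statement) =====
-- stated objective: faster
-- what changed: Instead of rescoring each candidate with a full inner loop over all positions, B computes each word's self-score once and scores every single-substitution neighbor in O(1) as base - self_i + row_i[j] (with a correct early return when the scoring matrix is empty), keeping the same iteration order, threshold and set accumulation.
import Mathlib
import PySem

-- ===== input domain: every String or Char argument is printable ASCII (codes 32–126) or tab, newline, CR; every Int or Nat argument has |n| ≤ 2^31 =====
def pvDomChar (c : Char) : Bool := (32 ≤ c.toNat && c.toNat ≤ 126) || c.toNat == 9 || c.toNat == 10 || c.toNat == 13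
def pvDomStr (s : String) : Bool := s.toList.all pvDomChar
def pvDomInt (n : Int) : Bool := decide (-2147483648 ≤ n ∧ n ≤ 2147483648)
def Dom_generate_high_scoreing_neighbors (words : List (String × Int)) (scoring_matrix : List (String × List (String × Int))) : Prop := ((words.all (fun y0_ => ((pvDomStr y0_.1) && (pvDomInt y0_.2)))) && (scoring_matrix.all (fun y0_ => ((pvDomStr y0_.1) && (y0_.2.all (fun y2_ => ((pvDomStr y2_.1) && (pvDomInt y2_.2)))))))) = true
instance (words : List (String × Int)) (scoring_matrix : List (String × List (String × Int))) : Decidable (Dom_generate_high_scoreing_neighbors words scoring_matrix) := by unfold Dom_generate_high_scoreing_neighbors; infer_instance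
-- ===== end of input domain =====

-- B replaces A's full per-neighbor rescan by one precomputed self-score per word plus an O(1)
-- adjustment per candidate (objective: faster, constant factor). Both programs return
-- list(<set>); equality is proved for the set in first-insertion order.

-- word[k] as a 1-character Python string (indices are always in range under Pre_)
def pvCharS (w : List Char) (k : Int) : String := String.ofList [PySem.List.pyGetD w k ' ']
-- scoring_matrix[c] / row[c]  (the key is present under Pre_, so the defaults are never used)
def pvRow (scoring_matrix : List (String × List (String × Int))) (c : String) : List (String × Int) :=
  PySem.Dict.getD (PySem.Dict.mk scoring_matrix) c []
def pvLook (row : List (String × Int)) (c : String) : Int :=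
  PySem.Dict.getD (PySem.Dict.mk row) c 0

-- ===== PORT A =====
def generate_high_scoreing_neighbors (words : List (String × Int)) (scoring_matrix : List (String × List (String × Int))) : List (String × Int) :=
  match words with
  | [] => []  -- Python: words[0] raises IndexError; excluded by Pre_
  | (w0, _) :: _ =>
    let word_len : Int := PySem.Str.len w0
    let threshold : Int :=
      if word_len = 2 then 8 else if word_len = 3 then 11 else if word_len = 4 then 15 else 0
    let neighboring_words : PySem.Set (String × Int) :=
      words.foldl (fun acc wi =>
        let w := wi.1.toList
        (PySem.List.pyRange 0 word_len 1).foldl (fun acc i =>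
          (PySem.Dict.keys (PySem.Dict.mk scoring_matrix)).foldl (fun acc j =>
            -- word[:i] + j + word[i+1:]  (0 ≤ i, so the slices are take/drop; exact)
            let new_word : List Char := w.take i.toNat ++ j.toList ++ w.drop (i.toNat + 1)
            let score : Int := (PySem.List.pyRange 0 word_len 1).foldl (fun score k =>
              score + pvLook (pvRow scoring_matrix (pvCharS w k)) (pvCharS new_word k)) 0
            if score ≥ threshold then PySem.Set.add acc (String.ofList new_word, wi.2) else acc)
            acc) acc) PySem.Set.empty
    neighboring_words

-- ===== PORT B =====
def generate_high_scoreing_neighbors_alt (words : List (String × Int)) (scoring_matrix : List (String × List (String × Int))) : List (String × Int) :=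
  match words with
  | [] => []  -- Python: words[0] raises IndexError; excluded by Pre_
  | (w0, _) :: _ =>
    let word_len : Int := PySem.Str.len w0
    let threshold : Int := PySem.Dict.getD (PySem.Dict.mk [((2 : Int), (8 : Int)), (3, 11), (4, 15)]) word_len 0
    if scoring_matrix.isEmpty then []  -- no substitution letters: no candidate neighbors at all
    else
      let keys := PySem.Dict.keys (PySem.Dict.mk scoring_matrix)
      let neighboring_words : PySem.Set (String × Int) :=
        words.foldl (fun acc wi =>
          let w := wi.1.toList
          -- score of the word against itself, computed once per word
          let base : Int := (PySem.List.pyRange 0 word_len 1).foldl (fun base k =>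
            base + pvLook (pvRow scoring_matrix (pvCharS w k)) (pvCharS w k)) 0
          (PySem.List.pyRange 0 word_len 1).foldl (fun acc i =>
            let row_i := pvRow scoring_matrix (pvCharS w i)
            let self_i := pvLook row_i (pvCharS w i)
            let pre := w.take i.toNat
            let suf := w.drop (i.toNat + 1)
            keys.foldl (fun acc j =>
              -- substituting j at position i changes only term i of the sum
              if base - self_i + pvLook row_i j ≥ threshold
              then PySem.Set.add acc (String.ofList (pre ++ j.toList ++ suf), wi.2) else acc)
              acc) acc) PySem.Set.empty
      neighboring_words

-- ===== PRECONDITION & SPEC =====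
-- Pre_ excludes the inputs where A raises (empty words, a word shorter than the first word, a
-- needed matrix entry missing), scoring matrices with a non-single-character key (there A
-- rescans a shifted neighbor, an accident of its implementation, and B raises KeyError), and
-- duplicate keys in an association list (which cannot represent a Python dict faithfully).
-- The empty scoring matrix and the empty first word are ADMITTED (both programs return []).
def Pre_generate_high_scoreing_neighbors (words : List (String × Int)) (scoring_matrix : List (String × List (String × Int))) : Prop :=
  match words with
  | [] => False
  | (w0, _) :: _ =>
    -- with an empty first word no loop body ever runs: both programs return []
    w0.toList = [] ∨
    ((scoring_matrix.map Prod.fst).Nodup ∧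
    (∀ p ∈ scoring_matrix, p.1.toList.length = 1 ∧ (p.2.map Prod.fst).Nodup) ∧
    (scoring_matrix = [] ∨
     ∀ q ∈ words, w0.toList.length ≤ q.1.toList.length ∧
      ∀ k, k < w0.toList.length →
        (PySem.Dict.contains (PySem.Dict.mk scoring_matrix) (String.ofList [q.1.toList.getD k ' ']) = true ∧
         ∀ j ∈ PySem.Dict.keys (PySem.Dict.mk scoring_matrix),
           PySem.Dict.contains (PySem.Dict.mk (pvRow scoring_matrix (String.ofList [q.1.toList.getD k ' ']))) j = true)))

instance (words : List (String × Int)) (scoring_matrix : List (String × List (String × Int))) : Decidable (Pre_generate_high_scoreing_neighbors words scoring_matrix) := by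
  unfold Pre_generate_high_scoreing_neighbors
  rcases words with _ | ⟨⟨w0, i0⟩, rest⟩ <;> infer_instance

def pvWitness_generate_high_scoreing_neighbors : (List (String × Int)) × (List (String × List (String × Int))) :=
  ([("AB", 0)], [("A", [("A", 5), ("B", 1)]), ("B", [("A", 1), ("B", 5)])])

def Spec_generate_high_scoreing_neighbors (words : List (String × Int)) (scoring_matrix : List (String × List (String × Int))) (out : List (String × Int)) : Prop := out = generate_high_scoreing_neighbors_alt words scoring_matrix
instance (words : List (String × Int)) (scoring_matrix : List (String × List (String × Int))) (out : List (String × Int)) : Decidable (Spec_generate_high_scoreing_neighbors words scoring_matrix out) := by unfold Spec_generate_high_scoreing_neighbors; infer_instance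

-- ===== CLAIM (what is proved, stated in full; the proofs are below) =====
def Claim_equal_generate_high_scoreing_neighbors : Prop := ∀ (words : List (String × Int)) (scoring_matrix : List (String × List (String × Int))), Dom_generate_high_scoreing_neighbors words scoring_matrix → Pre_generate_high_scoreing_neighbors words scoring_matrix → Spec_generate_high_scoreing_neighbors words scoring_matrix (generate_high_scoreing_neighbors words scoring_matrix)

-- ===== LEMMAS AND PROOFS =====

-- A's if/elif threshold chain and B's dictionary lookup agree on every word length
lemma pv_threshold_eq (n : Int) :
    (if n = 2 then (8 : Int) else if n = 3 then 11 else if n = 4 then 15 else 0)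
      = PySem.Dict.getD (PySem.Dict.mk [((2 : Int), (8 : Int)), (3, 11), (4, 15)]) n 0 := by
  by_cases h1 : n = 2 <;> by_cases h2 : n = 3 <;> by_cases h3 : n = 4 <;>
  · first
    | (subst h1; rfl) | (subst h2; rfl) | (subst h3; rfl)
    | (have e1 : ((2 : Int) == n) = false := by rw [beq_eq_false_iff_ne]; omega
       have e2 : ((3 : Int) == n) = false := by rw [beq_eq_false_iff_ne]; omega
       have e3 : ((4 : Int) == n) = false := by rw [beq_eq_false_iff_ne]; omega
       simp [PySem.Dict.getD, PySem.Dict.get?, List.find?, e1, e2, e3, h1, h2, h3])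

-- a sum over range(a, b) whose summand is changed at exactly one index i
lemma pv_foldl_add_update (f g : Int → Int) (a b i : Int)
    (ha : a ≤ i) (hb : i < b) (hfg : ∀ k, a ≤ k → k < b → k ≠ i → f k = g k) :
    (PySem.List.pyRange a b 1).foldl (fun s k => s + f k) 0
      = (PySem.List.pyRange a b 1).foldl (fun s k => s + g k) 0 - g i + f i := by
  rw [PySem.List.foldl_add, PySem.List.foldl_add]
  rw [PySem.List.pyRange_one_append a i b ha (by omega)]
  rw [PySem.List.pyRange_one_cons (by omega : i < b)]
  simp only [List.map_append, List.map_cons, List.sum_append, List.sum_cons]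
  have h1 : (PySem.List.pyRange a i 1).map f = (PySem.List.pyRange a i 1).map g := by
    apply List.map_congr_left
    intro k hk
    rw [PySem.List.mem_pyRange_one] at hk
    exact hfg k hk.1 (by omega) (by omega)
  have h2 : (PySem.List.pyRange (i+1) b 1).map f = (PySem.List.pyRange (i+1) b 1).map g := by
    apply List.map_congr_left
    intro k hk
    rw [PySem.List.mem_pyRange_one] at hk
    exact hfg k (by omega) hk.2 (by omega)
  rw [h1, h2]
  ring

-- the single-substitution neighbor is the word with position i overwritten
lemma pv_new_word_set (w : List Char) (j0 : Char) (i : Nat) (hi : i < w.length) :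
    w.take i ++ [j0] ++ w.drop (i + 1) = w.set i j0 := by
  rw [List.set_eq_take_append_cons_drop, if_pos hi]
  simp

lemma pv_cs_set_self (w : List Char) (j0 : Char) (i : Int) (h0 : 0 ≤ i) (hi : i.toNat < w.length) :
    pvCharS (w.set i.toNat j0) i = String.ofList [j0] := by
  unfold pvCharS
  rw [PySem.List.pyGetD_of_nonneg _ _ h0]
  rw [List.getD_eq_getElem _ _ (by simpa using hi)]
  simp

lemma pv_cs_set_ne (w : List Char) (j0 : Char) (i k : Int) (h0 : 0 ≤ k) (hk : k.toNat < w.length)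
    (hne : k ≠ i) (hi0 : 0 ≤ i) : pvCharS (w.set i.toNat j0) k = pvCharS w k := by
  unfold pvCharS
  rw [PySem.List.pyGetD_of_nonneg _ _ h0, PySem.List.pyGetD_of_nonneg _ _ h0]
  rw [List.getD_eq_getElem _ _ (by simpa using hk), List.getD_eq_getElem _ _ hk]
  rw [List.getElem_set_ne (by omega)]

theorem generate_high_scoreing_neighbors_spec : Claim_equal_generate_high_scoreing_neighbors := by
  intro words sm _hDom hPre
  unfold Spec_generate_high_scoreing_neighbors
  rcases words with _ | ⟨⟨w0, idx0⟩, rest⟩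
  · simp only [Pre_generate_high_scoreing_neighbors] at hPre
  · simp only [Pre_generate_high_scoreing_neighbors] at hPre
    rcases hPre with hw0 | ⟨hnd, hrows, hsm⟩
    · -- empty first word: every range is empty, both sides return []
      have h0 : (w0.length : Int) = 0 := by simpa using congrArg List.length hw0
      rcases sm with _ | ⟨p, sm'⟩ <;>
        simp [generate_high_scoreing_neighbors, generate_high_scoreing_neighbors_alt, h0,
          PySem.List.pyRange_one_eq_nil le_rfl, List.foldl_fixed]
    rcases sm with _ | ⟨p, sm'⟩
    · -- empty scoring matrix: A's key loop never runs, B returns [] directly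
      simp [generate_high_scoreing_neighbors, generate_high_scoreing_neighbors_alt,
        PySem.Dict.keys, List.foldl_fixed, PySem.Set.empty]
    have hwords := hsm.resolve_left (by simp)
    simp only [generate_high_scoreing_neighbors, generate_high_scoreing_neighbors_alt]
    rw [pv_threshold_eq]
    rw [if_neg (by simp [List.isEmpty])]
    apply PySem.List.foldl_congr_mem
    intro acc wi hwi
    apply PySem.List.foldl_congr_mem
    intro acc2 i hi
    apply PySem.List.foldl_congr_mem
    intro acc3 j hj
    obtain ⟨hlen, _hchars⟩ := hwords wi hwi
    rw [PySem.List.mem_pyRange_one] at hi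
    obtain ⟨hi0, hiw⟩ := hi
    have hilt : i.toNat < wi.1.toList.length := by
      rw [PySem.Str.len_eq] at hiw; omega
    have hj1 : j.toList.length = 1 := by
      simp only [PySem.Dict.keys] at hj
      obtain ⟨p, hp, rfl⟩ := List.mem_map.mp hj
      exact (hrows p hp).1
    obtain ⟨j0, hj0⟩ := List.length_eq_one_iff.mp hj1
    have hjof : String.ofList [j0] = j := by rw [← hj0, String.ofList_toList]
    rw [hj0, pv_new_word_set wi.1.toList j0 i.toNat hilt]
    rw [pv_foldl_add_update
      (fun k => pvLook (pvRow (p :: sm') (pvCharS wi.1.toList k)) (pvCharS (wi.1.toList.set i.toNat j0) k))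
      (fun k => pvLook (pvRow (p :: sm') (pvCharS wi.1.toList k)) (pvCharS wi.1.toList k))
      0 (PySem.Str.len w0) i hi0 hiw
      (by
        intro k hk0 hkw hne
        dsimp only
        rw [pv_cs_set_ne wi.1.toList j0 i k hk0 (by rw [PySem.Str.len_eq] at hkw; omega) hne hi0])]
    rw [pv_cs_set_self wi.1.toList j0 i hi0 hilt, hjof]
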